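/- GENERATED by farm/worked/mk_tree_copies.py from farm/worked/imdct_step3_iter0_loop.4/Proof.lean (a worked proof of the farm's unit `imdct_step3_iter0_loop.4`,
   accepted by the verdict) — do not edit. -/
import Asan.CheckWalk
import Vorbis.Spec.Units.imdct_step3_iter0_loop_4
open X86 X86.User Asan Vorbis Vorbis.Spec

set_option maxRecDepth 4000
set_option maxHeartbeats 4000000

/-- Segment 4 of `imdct_step3_iter0_loop` (`loop1` … : `test r14d, r14d ; jg` into the body, else the epilogue and `ret`): a segment
that STARTS at a cut point (the assertion `AtLoop` is opened field by field) and has TWO exits: the assertion `AtBody` at `cut1`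
(rebuilt from the entry assertion's fields: nothing changed but RIP and the status flags), and the function's `Returned`, made
with `Returned.mk` by hand (`saved` from the popped slots, `same` and the post from the carried fields). -/
theorem Vorbis.Spec.Worked.imdct_step3_iter0_loop_4_ok : Vorbis.Spec.imdct_step3_iter0_loop_4.Statement := by
  intro Lay hLay μ hμ u₀ hcode others frames len i0 koff ue ret t v hv
  obtain ⟨hrip, hbody, hle, hcnt, hee0, hee2, hA⟩ := hv
  obtain ⟨he, hpre, hcodeok, habi, hframe, hsame, hshadow⟩ := hbody
  obtain ⟨hrsp, sret, s15, s14, s13, s12, sbp, sbx⟩ := hframe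
  have he0 := he
  v_entry he
  have hdf := habi.1
  have hmx := habi.2
  have hsse : SseOK v := sseOK_of_abiInv habi
  have hq31 : quarter ue < 2 ^ 31 := by
    have := hpre.2.1
    rw [quarter_def]
    rw [arg32_def] at this
    omega
  u_walk hcode [hμ.vendor] until [Vorbis.L.imdct_step3_iter0_loop.cut1] span [Vorbis.L.textLo, Vorbis.L.textHi] side (v_side)
  · -- the arm into the body: `r14d > 0`, so `t < m`; nothing changed but RIP and the status flags
    refine ReachVia.done (Or.inl ⟨w_rip, ⟨⟨he0, hpre, w_eq, ?_, ⟨?_, ?_, ?_, ?_, ?_, ?_, ?_, ?_⟩, ?_, ?_⟩, hle, ?_, ?_, ?_, ?_⟩, ?_⟩)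
    · v_inv
    · rw [w_kept .rsp rfl]
      exact hrsp
    · rw [w_mem]
      exact sret
    · rw [w_mem]
      exact s15
    · rw [w_mem]
      exact s14
    · rw [w_mem]
      exact s13
    · rw [w_mem]
      exact s12
    · rw [w_mem]
      exact sbp
    · rw [w_mem]
      exact sbx
    · rw [w_mem]
      exact hsame
    · rw [w_mem]
      exact hshadow
    · rw [w_kept .r14 rfl]
      exact hcnt
    · rw [w_kept .r12 rfl]
      exact hee0
    · rw [w_kept .rbx rfl]
      exact hee2
    · rw [w_kept .rbp rfl]
      exact hA
    · -- `t < m` from the branch: r14d ≠ 0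
      have h14 := hbr_105371.1
      rw [Asan.part32_toNat] at h14
      omega
  · -- the epilogue: the contract's `Returned`
    refine ReachVia.done (Or.inr ?_)
    refine X86.User.Returned.mk w_rip w_rsp ?r_saved ?r_same (Vorbis.conv_code_in w_eq) ?r_inv ?r_post
    case r_saved =>
      intro r hr
      cases r <;> first
        | exact absurd hr (by decide)
        | (with_reducible assumption)
    case r_same =>
      rw [w_mem]
      exact hsame
    case r_inv => v_inv
    case r_post =>
      show ShadowUntouched ue.mem s_105385.mem
      rw [w_mem]
      exact hshadow
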